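-- pv_equiv track=rewrite | github.com/YallaPapi/snowflake | src/pipeline/orchestrator.py | regenerate_downstream
-- ===== SOURCE A (Python) =====
-- from typing import Dict, Any, Optional, Tuple, List
--
-- def regenerate_downstream(from_step: int) -> List[str]:
--     """
--     Regenerate all downstream artifacts after a change
--
--     Args:
--         from_step: Step number that changed
--
--     Returns:
--         List of regenerated steps
--     """
--     regenerated = []
--
--     # Map of dependencies
--     dependencies = {
--         1: [0],           # Step 1 depends on Step 0
--         2: [0, 1],        # Step 2 depends on Steps 0 and 1
--         3: [0, 1, 2],     # Step 3 depends on Steps 0, 1, and 2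
--         4: [0, 1, 2],     # Step 4 depends on Steps 0, 1, and 2
--         5: [3],           # Step 5 depends on Step 3
--         6: [2, 4],        # Step 6 depends on Steps 2 and 4
--         7: [3, 5],        # Step 7 depends on Steps 3 and 5
--         8: [6, 7],        # Step 8 depends on Steps 6 and 7
--         9: [8],           # Step 9 depends on Step 8
--         10: [8, 9]        # Step 10 depends on Steps 8 and 9
--     }
--
--     # Find all steps that need regeneration
--     for step, deps in dependencies.items():
--         if from_step in deps and step > from_step:
--             # This step needs regeneration
--             # (Implementation would call appropriate execute method)
--             regenerated.append(f"step_{step}")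
--
--     return regenerated
-- ===== SOURCE B (Python) =====
-- def regenerate_downstream(from_step: int):
--     """
--     Regenerate all downstream artifacts after a change
--
--     Args:
--         from_step: Step number that changed
--
--     Returns:
--         List of regenerated steps
--     """
--     # Reverse adjacency: for each base step, the downstream steps (ascending)
--     # that list it as a dependency. All dependencies point to strictly lower
--     # step numbers, so the 'step > from_step' condition is built in.
--     dependents = {
--         0: [1, 2, 3, 4],
--         1: [2, 3, 4],
--         2: [3, 4, 6],
--         3: [5, 7],
--         4: [6],
--         5: [7],
--         6: [8],
--         7: [8],
--         8: [9, 10],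
--         9: [10],
--     }
--     return [f"step_{s}" for s in dependents.get(from_step, [])]
-- ===== Notes on version B (the rewrite author's own statement) =====
-- stated objective: idiomatic
-- what changed: Replaces the scan over the whole dependency dict with an inner membership test by a single lookup in a precomputed reverse-adjacency (dependents) map.
import Mathlib
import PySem

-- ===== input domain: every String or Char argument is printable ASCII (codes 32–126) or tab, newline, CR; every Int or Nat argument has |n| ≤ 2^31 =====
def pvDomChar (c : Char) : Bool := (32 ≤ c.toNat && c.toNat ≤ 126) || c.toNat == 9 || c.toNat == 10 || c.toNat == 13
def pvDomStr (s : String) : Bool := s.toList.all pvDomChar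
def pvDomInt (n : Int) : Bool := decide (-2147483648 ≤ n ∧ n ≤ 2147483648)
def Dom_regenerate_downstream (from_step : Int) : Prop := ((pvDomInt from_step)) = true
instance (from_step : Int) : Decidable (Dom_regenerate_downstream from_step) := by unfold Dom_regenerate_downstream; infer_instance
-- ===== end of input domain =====

-- B replaces A's full scan of the dependency dict by one lookup in a precomputed reverse-adjacency map (idiomatic).

-- ===== PORT A =====
-- the dependencies dict, in insertion order
def pvDeps : List (Int × List Int) :=
  [(1, [0]), (2, [0, 1]), (3, [0, 1, 2]), (4, [0, 1, 2]), (5, [3]),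
   (6, [2, 4]), (7, [3, 5]), (8, [6, 7]), (9, [8]), (10, [8, 9])]

def regenerate_downstream (from_step : Int) : List String :=
  pvDeps.foldl
    (fun regenerated p =>
      if from_step ∈ p.2 ∧ p.1 > from_step then
        regenerated ++ ["step_" ++ PySem.Int.toStr p.1]
      else regenerated)
    []

-- ===== PORT B =====
-- reverse adjacency map: base step ↦ downstream steps (ascending)
def pvDependents : List (Int × List Int) :=
  [(0, [1, 2, 3, 4]), (1, [2, 3, 4]), (2, [3, 4, 6]), (3, [5, 7]), (4, [6]),
   (5, [7]), (6, [8]), (7, [8]), (8, [9, 10]), (9, [10])]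

-- dict.get(from_step, []) : first-match lookup with default
def pvGetDeps : List (Int × List Int) → Int → List Int
  | [], _ => []
  | (k, v) :: r, n => if n = k then v else pvGetDeps r n

def regenerate_downstream_alt (from_step : Int) : List String :=
  (pvGetDeps pvDependents from_step).map (fun s => "step_" ++ PySem.Int.toStr s)

-- ===== PRECONDITION & SPEC =====
def Spec_regenerate_downstream (from_step : Int) (out : List String) : Prop := out = regenerate_downstream_alt from_step
instance (from_step : Int) (out : List String) : Decidable (Spec_regenerate_downstream from_step out) := by unfold Spec_regenerate_downstream; infer_instance

-- ===== CLAIM (what is proved, stated in full; the proofs are below) =====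
def Claim_equal_regenerate_downstream : Prop := ∀ (from_step : Int), Dom_regenerate_downstream from_step → Spec_regenerate_downstream from_step (regenerate_downstream from_step)

-- ===== LEMMAS AND PROOFS =====
-- when from_step is none of 0..9, both programs return []
lemma regen_out_of_range (n : Int) (h : ∀ k : Int, k ∈ ([0,1,2,3,4,5,6,7,8,9] : List Int) → n ≠ k) :
    regenerate_downstream n = regenerate_downstream_alt n := by
  have h0 := h 0 (by decide); have h1 := h 1 (by decide); have h2 := h 2 (by decide)
  have h3 := h 3 (by decide); have h4 := h 4 (by decide); have h5 := h 5 (by decide)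
  have h6 := h 6 (by decide); have h7 := h 7 (by decide); have h8 := h 8 (by decide)
  have h9 := h 9 (by decide)
  simp [regenerate_downstream, regenerate_downstream_alt, pvDeps, pvDependents,
        pvGetDeps, List.foldl, h0, h1, h2, h3, h4, h5, h6, h7, h8, h9]

-- ===== VERDICT (by name: the statement is the Claim_ definition above) =====
theorem regenerate_downstream_spec : Claim_equal_regenerate_downstream := by
  intro n _
  unfold Spec_regenerate_downstream
  by_cases h0 : n = 0; · subst h0; decide
  by_cases h1 : n = 1; · subst h1; decide
  by_cases h2 : n = 2; · subst h2; decide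
  by_cases h3 : n = 3; · subst h3; decide
  by_cases h4 : n = 4; · subst h4; decide
  by_cases h5 : n = 5; · subst h5; decide
  by_cases h6 : n = 6; · subst h6; decide
  by_cases h7 : n = 7; · subst h7; decide
  by_cases h8 : n = 8; · subst h8; decide
  by_cases h9 : n = 9; · subst h9; decide
  exact regen_out_of_range n (by intro k hk; fin_cases hk <;> assumption)
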